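-- pv_equiv track=rewrite | github.com/singhaltanmay/alicebot | dictionary.py | delete_element_of_a_list
-- ===== SOURCE A (Python) =====
-- def delete_element_of_a_list(list,element,number=None):
--     if number==None:
--         #getting default value of number
--         number=list.count(element)
--
--
--     newlist=[]
--     numrem=1
--     for i in list:
--         if numrem<=number:
--             if i!=element:
--                 newlist.append(i)
--             else:
--                 numrem+=1
--         else:
--             newlist.append(i)
--
--     return newlist
-- ===== SOURCE B (Python) =====
-- def delete_element_of_a_list(list, element, number=None):
--     if number == None:
--         number = list.count(element)
--     # pass 1: collect indices of the occurrences whose 1-based rank <= number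
--     remove = set()
--     rank = 1
--     for idx, value in enumerate(list):
--         if value == element:
--             if rank <= number:
--                 remove.add(idx)
--             rank += 1
--     # pass 2: keep every position whose index was not marked for removal
--     return [value for idx, value in enumerate(list) if idx not in remove]
-- ===== Notes on version B (the rewrite author's own statement) =====
-- stated objective: alternative
-- what changed: A decides keep/remove on the fly in a single loop with a mutable removed-counter; B first enumerates the list and collects into a set the indices of occurrences of element whose 1-based rank is <= number, then builds the result in a second pass keeping positions not in that set.
import Mathlib
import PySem

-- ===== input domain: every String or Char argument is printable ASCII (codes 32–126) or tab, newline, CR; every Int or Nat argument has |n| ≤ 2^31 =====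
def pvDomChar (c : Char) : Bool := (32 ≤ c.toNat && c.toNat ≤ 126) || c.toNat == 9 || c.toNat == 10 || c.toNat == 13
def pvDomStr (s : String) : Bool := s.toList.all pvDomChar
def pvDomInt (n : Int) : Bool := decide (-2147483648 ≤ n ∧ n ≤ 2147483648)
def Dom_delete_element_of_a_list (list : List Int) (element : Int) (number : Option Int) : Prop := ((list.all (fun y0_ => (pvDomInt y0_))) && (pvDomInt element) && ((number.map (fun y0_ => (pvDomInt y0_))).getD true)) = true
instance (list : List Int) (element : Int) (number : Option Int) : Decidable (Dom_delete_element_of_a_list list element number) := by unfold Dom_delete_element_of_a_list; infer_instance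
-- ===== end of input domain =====

-- B (an 'alternative' decomposition, same cost): instead of A's single decide-as-you-go loop, B first
-- collects into a set the indices of the occurrences of element whose 1-based rank is <= number, then
-- builds the result in a second pass keeping the positions not in that set.

-- ===== PORT A =====
def delete_element_of_a_list (list : List Int) (element : Int) (number : Option Int) : List Int :=
  let number : Int :=
    match number with
    | none => (PySem.List.count list element : Int)
    | some m => m
  (list.foldl
    (fun (st : List Int × Int) i =>
      if st.2 ≤ number then
        (if i ≠ element then (st.1 ++ [i], st.2) else (st.1, st.2 + 1))
      else (st.1 ++ [i], st.2))
    ([], 1)).1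

-- ===== PORT B =====
def delete_element_of_a_list_alt (list : List Int) (element : Int) (number : Option Int) : List Int :=
  let number : Int :=
    match number with
    | none => (PySem.List.count list element : Int)
    | some m => m
  let remove : PySem.Set Int :=
    ((PySem.List.enumerate list 0).foldl
      (fun (st : PySem.Set Int × Int) p =>
        if p.2 = element then
          (if st.2 ≤ number then (PySem.Set.add st.1 p.1, st.2 + 1) else (st.1, st.2 + 1))
        else st)
      (PySem.Set.empty, 1)).1
  (PySem.List.enumerate list 0).foldl
    (fun acc p => if PySem.Set.contains remove p.1 then acc else acc ++ [p.2]) []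

-- ===== PRECONDITION & SPEC =====
def Spec_delete_element_of_a_list (list : List Int) (element : Int) (number : Option Int) (out : List Int) : Prop := out = delete_element_of_a_list_alt list element number
instance (list : List Int) (element : Int) (number : Option Int) (out : List Int) : Decidable (Spec_delete_element_of_a_list list element number out) := by unfold Spec_delete_element_of_a_list; infer_instance

-- ===== CLAIM (what is proved, stated in full; the proofs are below) =====
def Claim_equal_delete_element_of_a_list : Prop := ∀ (list : List Int) (element : Int) (number : Option Int), Dom_delete_element_of_a_list list element number → Spec_delete_element_of_a_list list element number (delete_element_of_a_list list element number)

-- ===== LEMMAS AND PROOFS =====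

-- canonical form of the result: walk the list keeping a rank counter that advances on every
-- occurrence of e; drop an occurrence iff its rank is ≤ n
def canonDel (e n : Int) : List Int → Int → List Int
  | [], _ => []
  | x :: xs, r =>
    if x = e then (if r ≤ n then canonDel e n xs (r + 1) else x :: canonDel e n xs (r + 1))
    else x :: canonDel e n xs r

-- indices (starting at s) of the occurrences of e whose rank (starting at r) is ≤ n
def idxDel (e n : Int) : List Int → Int → Int → List Int
  | [], _, _ => []
  | x :: xs, s, r =>
    if x = e then
      (if r ≤ n then s :: idxDel e n xs (s + 1) (r + 1) else idxDel e n xs (s + 1) (r + 1))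
    else idxDel e n xs (s + 1) r

-- second-pass filter in recursive form
def filterIdx (R : PySem.Set Int) : List Int → Int → List Int
  | [], _ => []
  | x :: xs, s =>
    if PySem.Set.contains R s then filterIdx R xs (s + 1) else x :: filterIdx R xs (s + 1)

theorem canonDel_gt (e n : Int) (xs : List Int) : ∀ r r', n < r → n < r' →
    canonDel e n xs r = canonDel e n xs r' := by
  induction xs with
  | nil => intro r r' _ _; rfl
  | cons x xs ih =>
    intro r r' hr hr'
    simp only [canonDel]
    by_cases hx : x = e
    · rw [if_pos hx, if_pos hx, if_neg (show ¬ r ≤ n by omega), if_neg (show ¬ r' ≤ n by omega),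
        ih (r + 1) (r' + 1) (by omega) (by omega)]
    · rw [if_neg hx, if_neg hx, ih r r' hr hr']

theorem A_loop (e n : Int) (xs : List Int) : ∀ (acc : List Int) (r : Int),
    (xs.foldl
      (fun (st : List Int × Int) i =>
        if st.2 ≤ n then
          (if i ≠ e then (st.1 ++ [i], st.2) else (st.1, st.2 + 1))
        else (st.1 ++ [i], st.2))
      (acc, r)).1 = acc ++ canonDel e n xs r := by
  induction xs with
  | nil => intro acc r; simp [canonDel]
  | cons x xs ih =>
    intro acc r
    simp only [List.foldl_cons, canonDel]
    by_cases hr : r ≤ n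
    · by_cases hx : x = e
      · rw [if_pos hr, if_pos hr, if_pos hx, if_neg (not_not_intro hx), ih acc (r + 1)]
      · rw [if_pos hr, if_neg hx, if_pos hx, ih (acc ++ [x]) r, List.append_assoc]
        rfl
    · by_cases hx : x = e
      · rw [if_neg hr, if_neg hr, if_pos hx, ih (acc ++ [x]) r,
          canonDel_gt e n xs r (r + 1) (by omega) (by omega), List.append_assoc]
        rfl
      · rw [if_neg hr, if_neg hx, ih (acc ++ [x]) r, List.append_assoc]
        rfl

theorem idxDel_ge (e n : Int) (xs : List Int) : ∀ s r i, i ∈ idxDel e n xs s r → s ≤ i := by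
  induction xs with
  | nil => intro s r i h; simp [idxDel] at h
  | cons x xs ih =>
    intro s r i h
    simp only [idxDel] at h
    by_cases hx : x = e
    · rw [if_pos hx] at h
      by_cases hrn : r ≤ n
      · rw [if_pos hrn] at h
        rcases List.mem_cons.mp h with h | h
        · omega
        · have := ih (s + 1) (r + 1) i h; omega
      · rw [if_neg hrn] at h
        have := ih (s + 1) (r + 1) i h; omega
    · rw [if_neg hx] at h
      have := ih (s + 1) r i h; omega

theorem pass1 (e n : Int) (xs : List Int) : ∀ (s r : Int) (S : PySem.Set Int),
    (∀ i ∈ S, i < s) →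
    ((PySem.List.enumerate xs s).foldl
      (fun (st : PySem.Set Int × Int) p =>
        if p.2 = e then
          (if st.2 ≤ n then (PySem.Set.add st.1 p.1, st.2 + 1) else (st.1, st.2 + 1))
        else st)
      (S, r)).1 = S ++ idxDel e n xs s r := by
  induction xs with
  | nil => intro s r S _; simp [PySem.List.enumerate_nil, idxDel]
  | cons x xs ih =>
    intro s r S hS
    rw [PySem.List.enumerate_cons]
    simp only [List.foldl_cons, idxDel]
    by_cases hx : x = e
    · by_cases hrn : r ≤ n
      · rw [if_pos hx, if_pos hx, if_pos hrn, if_pos hrn,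
          PySem.Set.add_of_not_mem (fun h => absurd (hS s h) (by omega)),
          ih (s + 1) (r + 1) (S ++ [s])
            (by intro i hi
                rcases List.mem_append.mp hi with h | h
                · have := hS i h; omega
                · simp at h; omega),
          List.append_assoc]
        rfl
      · rw [if_pos hx, if_pos hx, if_neg hrn, if_neg hrn]
        exact ih (s + 1) (r + 1) S (by intro i hi; have := hS i hi; omega)
    · rw [if_neg hx, if_neg hx]
      exact ih (s + 1) r S (by intro i hi; have := hS i hi; omega)

theorem pass2 (R : PySem.Set Int) (xs : List Int) : ∀ (s : Int) (acc : List Int),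
    (PySem.List.enumerate xs s).foldl
      (fun acc p => if PySem.Set.contains R p.1 then acc else acc ++ [p.2]) acc
      = acc ++ filterIdx R xs s := by
  induction xs with
  | nil => intro s acc; simp [PySem.List.enumerate_nil, filterIdx]
  | cons x xs ih =>
    intro s acc
    rw [PySem.List.enumerate_cons]
    simp only [List.foldl_cons, filterIdx]
    by_cases h : PySem.Set.contains R s
    · rw [if_pos h, if_pos h, ih (s + 1) acc]
    · rw [if_neg h, if_neg h, ih (s + 1) (acc ++ [x]), List.append_assoc]
      rfl

theorem filterIdx_canon (e n : Int) (xs : List Int) : ∀ (s r : Int) (R : PySem.Set Int),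
    (∀ i, s ≤ i → (PySem.Set.contains R i = true ↔ i ∈ idxDel e n xs s r)) →
    filterIdx R xs s = canonDel e n xs r := by
  induction xs with
  | nil => intro s r R _; rfl
  | cons x xs ih =>
    intro s r R hR
    simp only [filterIdx, canonDel]
    by_cases hx : x = e
    · by_cases hrn : r ≤ n
      · have hhd : PySem.Set.contains R s = true := by
          rw [hR s le_rfl]
          simp only [idxDel, if_pos hx, if_pos hrn]
          exact List.mem_cons_self
        rw [if_pos hhd, if_pos hx, if_pos hrn]
        apply ih (s + 1) (r + 1) R
        intro i hi
        rw [hR i (by omega)]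
        simp only [idxDel, if_pos hx, if_pos hrn, List.mem_cons]
        constructor
        · intro h
          rcases h with h | h
          · omega
          · exact h
        · exact Or.inr
      · have hhd : ¬ PySem.Set.contains R s = true := by
          rw [hR s le_rfl]
          simp only [idxDel, if_pos hx, if_neg hrn]
          intro h
          have := idxDel_ge e n xs (s + 1) (r + 1) s h; omega
        rw [if_neg hhd, if_pos hx, if_neg hrn]
        congr 1
        apply ih (s + 1) (r + 1) R
        intro i hi
        rw [hR i (by omega)]
        simp only [idxDel, if_pos hx, if_neg hrn]
    · have hhd : ¬ PySem.Set.contains R s = true := by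
        rw [hR s le_rfl]
        simp only [idxDel, if_neg hx]
        intro h
        have := idxDel_ge e n xs (s + 1) r s h; omega
      rw [if_neg hhd, if_neg hx]
      congr 1
      apply ih (s + 1) r R
      intro i hi
      rw [hR i (by omega)]
      simp only [idxDel, if_neg hx]

-- ports, for a fixed resolved value of number
theorem core (list : List Int) (element n : Int) :
    (list.foldl
      (fun (st : List Int × Int) i =>
        if st.2 ≤ n then
          (if i ≠ element then (st.1 ++ [i], st.2) else (st.1, st.2 + 1))
        else (st.1 ++ [i], st.2))
      ([], 1)).1
    = (PySem.List.enumerate list 0).foldl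
        (fun acc p => if PySem.Set.contains
            (((PySem.List.enumerate list 0).foldl
              (fun (st : PySem.Set Int × Int) p =>
                if p.2 = element then
                  (if st.2 ≤ n then (PySem.Set.add st.1 p.1, st.2 + 1) else (st.1, st.2 + 1))
                else st)
              (PySem.Set.empty, 1)).1) p.1 then acc else acc ++ [p.2]) [] := by
  rw [A_loop element n list [] 1, List.nil_append,
    pass2 _ list 0 [], List.nil_append,
    pass1 element n list 0 1 PySem.Set.empty (by intro i hi; simp [PySem.Set.empty] at hi),
    show (PySem.Set.empty ++ idxDel element n list 0 1 : PySem.Set Int)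
        = idxDel element n list 0 1 from rfl]
  exact (filterIdx_canon element n list 0 1 (idxDel element n list 0 1)
    (fun i _ => PySem.Set.contains_iff _ _)).symm

-- ===== VERDICT (by name: the statement is the Claim_ definition above) =====
theorem delete_element_of_a_list_spec : Claim_equal_delete_element_of_a_list := by
  intro list element number _
  show delete_element_of_a_list list element number = delete_element_of_a_list_alt list element number
  cases number with
  | none => exact core list element (PySem.List.count list element : Int)
  | some m => exact core list element m
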